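-- pv_equiv track=rewrite | github.com/brianstm/NUS | CS1010E/PE2/1920 S1/Question1.py | super_fib_R
-- ===== SOURCE A (Python) =====
-- def super_fib_R(term2, n):
--     if n == 1:
--         return [1]
--     elif n == 2:
--         return [1, term2]
--     else:
--         result = super_fib_R(term2, n-1)
--         result.append(sum(result))
--         return result
-- ===== SOURCE B (Python) =====
-- def super_fib_R(term2, n):
--     if n == 1:
--         return [1]
--     result = [1, term2]
--     total = 1 + term2
--     for _ in range(n - 2):
--         result.append(total)
--         total += total
--     return result
-- ===== Notes on version B (the rewrite author's own statement) =====
-- stated objective: faster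
-- what changed: Replaces the recursion that re-sums the whole list at every step with a single iterative loop maintaining a running total (which simply doubles each step), appending it incrementally.
import Mathlib
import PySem

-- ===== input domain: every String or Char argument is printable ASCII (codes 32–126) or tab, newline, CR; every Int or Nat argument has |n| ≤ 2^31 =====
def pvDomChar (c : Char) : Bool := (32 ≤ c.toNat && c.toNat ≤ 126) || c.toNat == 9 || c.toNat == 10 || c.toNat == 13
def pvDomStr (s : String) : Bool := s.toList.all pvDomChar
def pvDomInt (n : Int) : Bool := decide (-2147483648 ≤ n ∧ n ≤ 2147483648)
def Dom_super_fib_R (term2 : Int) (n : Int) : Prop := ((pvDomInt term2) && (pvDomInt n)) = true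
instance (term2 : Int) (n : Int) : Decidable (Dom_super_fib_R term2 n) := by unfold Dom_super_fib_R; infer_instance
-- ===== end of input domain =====

-- B replaces A's recursion (which re-sums the whole list each step) with one iterative loop
-- keeping a running total that doubles each step: O(n) instead of O(n^2) (objective: faster).


-- ===== PORT A =====
-- fuel makes the Python recursion total; for n ≥ 1 fuel n.toNat is exactly enough,
-- and Pre_ excludes n ≤ 0 where the Python recurses forever (RecursionError).
def superFibAFuel (term2 : Int) : Nat → Int → List Int
  | 0, _ => []
  | fuel+1, n =>
    if n = 1 then [1]
    else if n = 2 then [1, term2]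
    else
      let result := superFibAFuel term2 fuel (n-1)
      result ++ [result.sum]

def super_fib_R (term2 : Int) (n : Int) : List Int :=
  superFibAFuel term2 n.toNat n

-- ===== PORT B =====
-- the for-loop of Source B: state (result, total), k iterations left
def superFibBLoop (result : List Int) (total : Int) : Nat → List Int
  | 0 => result
  | k+1 => superFibBLoop (result ++ [total]) (total + total) k

def super_fib_R_alt (term2 : Int) (n : Int) : List Int :=
  if n = 1 then [1]
  else superFibBLoop [1, term2] (1 + term2) (n - 2).toNat

-- ===== PRECONDITION & SPEC =====
-- Pre_ excludes n ≤ 0, on which the Python A recurses without a base case and raises RecursionError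
-- (B returns [1, term2] there, its loop running zero times).
def Pre_super_fib_R (term2 : Int) (n : Int) : Prop := 1 ≤ n
instance (term2 : Int) (n : Int) : Decidable (Pre_super_fib_R term2 n) := by unfold Pre_super_fib_R; infer_instance
def pvWitness_super_fib_R : Int × Int := (3, 5)

def Spec_super_fib_R (term2 : Int) (n : Int) (out : List Int) : Prop := out = super_fib_R_alt term2 n
instance (term2 : Int) (n : Int) (out : List Int) : Decidable (Spec_super_fib_R term2 n out) := by unfold Spec_super_fib_R; infer_instance

-- ===== CLAIM (what is proved, stated in full; the proofs are below) =====
def Claim_equal_super_fib_R : Prop := ∀ (term2 : Int) (n : Int), Dom_super_fib_R term2 n → Pre_super_fib_R term2 n → Spec_super_fib_R term2 n (super_fib_R term2 n)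

-- ===== LEMMAS AND PROOFS =====

-- A's iteration pattern, abstracted: append the current sum, k times.
def iterSum (res : List Int) : Nat → List Int
  | 0 => res
  | k+1 => iterSum (res ++ [res.sum]) k

lemma iterSum_succ (res : List Int) (k : Nat) :
    iterSum res (k+1) = iterSum res k ++ [(iterSum res k).sum] := by
  induction k generalizing res with
  | zero => simp [iterSum]
  | succ k ih => simp only [iterSum]; exact ih _

-- B's loop equals A's iteration pattern when the running total is the list sum.
lemma loop_eq_iterSum (res : List Int) (total : Int) (h : res.sum = total) (k : Nat) :
    superFibBLoop res total k = iterSum res k := by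
  induction k generalizing res total with
  | zero => rfl
  | succ k ih =>
    simp only [superFibBLoop, iterSum, h]
    exact ih _ _ (by simp [h])

-- A with exact fuel, at n = m+2, computes the iteration pattern from [1, term2].
lemma superFibA_eq_iterSum (term2 : Int) (m : Nat) :
    superFibAFuel term2 (m+2) ((m : Int) + 2) = iterSum [1, term2] m := by
  induction m with
  | zero => norm_num [superFibAFuel, iterSum]
  | succ m ih =>
    have hc : (((m+1 : Nat)) : Int) + 2 = (m : Int) + 3 := by push_cast; ring
    rw [hc, show m+1+2 = (m+2)+1 from rfl, superFibAFuel]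
    rw [if_neg (by omega), if_neg (by omega),
        show (m : Int) + 3 - 1 = (m : Int) + 2 from by ring, ih, iterSum_succ]

-- ===== VERDICT (by name: the statement is the Claim_ definition above) =====
theorem super_fib_R_spec : Claim_equal_super_fib_R := by
  intro term2 n _ hpre
  unfold Spec_super_fib_R super_fib_R super_fib_R_alt
  by_cases h1 : n = 1
  · subst h1; rfl
  · rw [if_neg h1]
    have h2 : 2 ≤ n := by unfold Pre_super_fib_R at hpre; omega
    obtain ⟨m, hm⟩ : ∃ m : Nat, n = (m : Int) + 2 := ⟨(n - 2).toNat, by omega⟩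
    have htn : n.toNat = m + 2 := by omega
    have htm : (n - 2).toNat = m := by omega
    rw [htn, htm, hm, superFibA_eq_iterSum]
    rw [loop_eq_iterSum _ _ (by simp)]
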